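-- pv_equiv track=rewrite | github.com/sequentech/iam | authapi/authmethods/utils.py | normalize_dni
-- ===== SOURCE A (Python) =====
-- DNI_ALLOWED_CHARS = "1234567890QWERTYUIOPASDFGHJKLZXCVBNM"
--
-- def normalize_dni(dni):
--     '''
--     Normalizes dnis, using uppercase, removing characters not allowed and
--     left-side zeros
--     '''
--     dni2 = ''.join([i for i in dni.upper() if i in DNI_ALLOWED_CHARS])
--     last_char = ""
--     dni3 = ""
--     for c in dni2:
--       if (last_char is "" or last_char not in '1234567890XY') and c == '0':
--         continue
--       dni3 += c
--       last_char = c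
--     return dni3
-- ===== SOURCE B (Python) =====
-- DNI_ALLOWED_CHARS = "1234567890QWERTYUIOPASDFGHJKLZXCVBNM"
--
-- def normalize_dni(dni):
--     '''
--     Filter to uppercase allowed chars, then scan RIGHT-TO-LEFT buffering
--     each maximal run of zeros and keeping the whole run only when the
--     non-zero character to its left is a digit, X or Y; pieces are
--     collected back-to-front and reversed once at the end.
--     '''
--     dni2 = ''.join([i for i in dni.upper() if i in DNI_ALLOWED_CHARS])
--     pieces = []
--     zeros = 0
--     for c in reversed(dni2):
--         if c == '0':
--             zeros += 1
--         else:
--             if c in '123456789XY':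
--                 pieces.append('0' * zeros)
--             zeros = 0
--             pieces.append(c)
--     pieces.reverse()
--     return ''.join(pieces)
-- ===== Notes on version B (the rewrite author's own statement) =====
-- stated objective: alternative
-- what changed: Keeps A's filtering pass but replaces the left-to-right last-kept-character state machine by a right-to-left scan that buffers each maximal zero-run in a counter and keeps the whole run only if the non-zero character to its left is in 123456789XY, emitting pieces back-to-front.
import Mathlib
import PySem

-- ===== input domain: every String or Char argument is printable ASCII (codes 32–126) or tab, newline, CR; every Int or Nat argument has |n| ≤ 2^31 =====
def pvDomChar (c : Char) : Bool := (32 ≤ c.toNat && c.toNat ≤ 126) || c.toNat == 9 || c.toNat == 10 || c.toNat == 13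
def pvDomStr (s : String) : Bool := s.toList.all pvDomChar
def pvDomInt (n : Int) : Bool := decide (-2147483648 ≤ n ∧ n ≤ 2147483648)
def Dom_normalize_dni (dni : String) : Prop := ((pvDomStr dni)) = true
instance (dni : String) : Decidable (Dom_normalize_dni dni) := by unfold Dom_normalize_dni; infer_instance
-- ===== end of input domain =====

-- B keeps A's filtering pass but replaces the left-to-right last-kept-character state machine
-- by a right-to-left scan buffering each maximal zero-run in a counter; same return value.

-- ===== PORT A =====
def pvAllowed : List Char := "1234567890QWERTYUIOPASDFGHJKLZXCVBNM".toList

-- one step of A's loop; state = (dni3, last_char); last_char "" modelled as 'none'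
def pvAStep (st : List Char × Option Char) (c : Char) : List Char × Option Char :=
  if ((match st.2 with
       | none => true
       | some l => !("1234567890XY".toList.contains l)) && (c == '0')) then st
  else (st.1 ++ [c], some c)

def normalize_dni (dni : String) : String :=
  let dni2 := (PySem.Chars.upper dni.toList).filter (fun i => pvAllowed.contains i)
  String.ofList (dni2.foldl pvAStep ([], none)).1

-- ===== PORT B =====
def pvNZ : List Char := "123456789XY".toList

-- one step of B's loop over reversed(dni2); state = (pieces, zeros); '0'*zeros = List.replicate
def pvBStep (st : List (List Char) × Nat) (c : Char) : List (List Char) × Nat :=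
  if c == '0' then (st.1, st.2 + 1)
  else ((if pvNZ.contains c then st.1 ++ [List.replicate st.2 '0'] else st.1) ++ [[c]], 0)

def normalize_dni_alt (dni : String) : String :=
  let dni2 := (PySem.Chars.upper dni.toList).filter (fun i => pvAllowed.contains i)
  let st := dni2.reverse.foldl pvBStep ([], 0)
  String.ofList st.1.reverse.flatten

-- ===== PRECONDITION & SPEC =====
def Spec_normalize_dni (dni : String) (out : String) : Prop := out = normalize_dni_alt dni
instance (dni : String) (out : String) : Decidable (Spec_normalize_dni dni out) := by unfold Spec_normalize_dni; infer_instance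

-- ===== CLAIM (what is proved, stated in full; the proofs are below) =====
def Claim_equal_normalize_dni : Prop := ∀ (dni : String), Dom_normalize_dni dni → Spec_normalize_dni dni (normalize_dni dni)

-- ===== LEMMAS AND PROOFS =====

-- B's "zeros are kept" flag, computed from A's last_char
def pvKz (lastA : Option Char) : Bool :=
  match lastA with
  | none => false
  | some l => "1234567890XY".toList.contains l

-- reference left-to-right selection: kz = whether a zero-run here is kept
def pvSel (kz : Bool) : List Char → List Char
  | [] => []
  | c :: t =>
    if c = '0' then (if kz then '0' :: pvSel true t else pvSel false t)
    else c :: pvSel (pvNZ.contains c) t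

-- flag after processing a list
def pvKzA (kz : Bool) : List Char → Bool
  | [] => kz
  | c :: t => if c = '0' then pvKzA kz t else pvKzA (pvNZ.contains c) t

lemma pv_cls_eq (c : Char) (h : c ≠ '0') :
    ("1234567890XY".toList.contains c) = (pvNZ.contains c) := by
  show ['1','2','3','4','5','6','7','8','9','0','X','Y'].contains c
     = ['1','2','3','4','5','6','7','8','9','X','Y'].contains c
  simp only [List.contains_eq_mem, List.mem_cons, List.not_mem_nil, or_false, decide_eq_decide]
  constructor
  · rintro (h1|h1|h1|h1|h1|h1|h1|h1|h1|h1|h1|h1) <;> subst h1 <;> simp_all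
  · rintro (h1|h1|h1|h1|h1|h1|h1|h1|h1|h1|h1) <;> subst h1 <;> simp

lemma pvA_fold (d : List Char) : ∀ (acc : List Char) (lastA : Option Char),
    (d.foldl pvAStep (acc, lastA)).1 = acc ++ pvSel (pvKz lastA) d := by
  induction d with
  | nil => intro acc lastA; simp [pvSel]
  | cons c t ih =>
    intro acc lastA
    by_cases hc : c = '0'
    · subst hc
      cases hkz : pvKz lastA with
      | false =>
        have ha : pvAStep (acc, lastA) '0' = (acc, lastA) := by
          cases lastA with
          | none => rfl
          | some l =>
            have hl : ("1234567890XY".toList.contains l) = false := by simpa [pvKz] using hkz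
            simp only [pvAStep, hl]; rfl
        rw [List.foldl_cons, ha, ih acc lastA, hkz]
        simp [pvSel]
      | true =>
        obtain ⟨l, rfl⟩ : ∃ l, lastA = some l := by
          cases lastA with
          | none => simp [pvKz] at hkz
          | some l => exact ⟨l, rfl⟩
        have hl : ("1234567890XY".toList.contains l) = true := by simpa [pvKz] using hkz
        have ha : pvAStep (acc, some l) '0' = (acc ++ ['0'], some '0') := by
          simp only [pvAStep, hl]; rfl
        rw [List.foldl_cons, ha, ih (acc ++ ['0']) (some '0')]
        simp [pvSel, pvKz]
    · have hce : (c == '0') = false := by simpa using hc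
      have ha : pvAStep (acc, lastA) c = (acc ++ [c], some c) := by
        cases lastA with
        | none => simp only [pvAStep, hce]; rfl
        | some l => simp only [pvAStep, hce, Bool.and_false]; rfl
      rw [List.foldl_cons, ha, ih (acc ++ [c]) (some c)]
      have : pvKz (some c) = pvNZ.contains c := by
        simpa [pvKz] using pv_cls_eq c hc
      rw [this]
      simp [pvSel, hc]

lemma pvSel_append (d : List Char) (c : Char) : ∀ (kz : Bool),
    pvSel kz (d ++ [c]) =
      pvSel kz d ++ (if c = '0' then (if pvKzA kz d then ['0'] else []) else [c]) := by
  induction d with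
  | nil => intro kz; by_cases hc : c = '0' <;> cases kz <;> simp [pvSel, pvKzA, hc]
  | cons b t ih =>
    intro kz
    by_cases hb : b = '0'
    · subst hb
      cases kz <;> simp [pvSel, pvKzA, ih]
    · simp [pvSel, pvKzA, hb, ih]

lemma pvKzA_append (d : List Char) (c : Char) (kz : Bool) :
    pvKzA kz (d ++ [c]) = if c = '0' then pvKzA kz d else pvNZ.contains c := by
  induction d generalizing kz with
  | nil => simp [pvKzA]
  | cons b t ih => by_cases hb : b = '0' <;> simp [pvKzA, hb, ih]

-- pieces produced by B's loop from state (·, z) over the rest r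
def pvH : Nat → List Char → List (List Char)
  | _, [] => []
  | z, c :: r =>
    if c = '0' then pvH (z + 1) r
    else (if pvNZ.contains c then [List.replicate z '0'] else []) ++ [c] :: pvH 0 r

lemma pvB_fold (r : List Char) : ∀ (ps : List (List Char)) (z : Nat),
    (r.foldl pvBStep (ps, z)).1 = ps ++ pvH z r := by
  induction r with
  | nil => intro ps z; simp [pvH]
  | cons c t ih =>
    intro ps z
    by_cases hc : c = '0'
    · subst hc; rw [List.foldl_cons]
      have : pvBStep (ps, z) '0' = (ps, z + 1) := rfl
      rw [this, ih]; simp [pvH]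
    · have hce : (c == '0') = false := by simpa using hc
      rw [List.foldl_cons]
      have : pvBStep (ps, z) c
          = ((if pvNZ.contains c then ps ++ [List.replicate z '0'] else ps) ++ [[c]], 0) := by
        simp only [pvBStep, hce]; rfl
      rw [this, ih]
      by_cases hnz : c ∈ pvNZ <;> simp [pvH, hc, hnz]

lemma pvH_sel (r : List Char) : ∀ (z : Nat),
    (pvH z r).reverse.flatten
      = pvSel false r.reverse ++ (if pvKzA false r.reverse then List.replicate z '0' else []) := by
  induction r with
  | nil => intro z; simp [pvH, pvSel, pvKzA]
  | cons c t ih =>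
    intro z
    by_cases hc : c = '0'
    · subst hc
      show (pvH (z + 1) t).reverse.flatten = _
      rw [ih (z + 1)]
      have h1 := pvSel_append t.reverse '0' false
      have h2 := pvKzA_append t.reverse '0' false
      simp only [List.reverse_cons, h1, h2]
      by_cases hk : pvKzA false t.reverse <;>
        simp [hk, List.replicate_succ, List.append_assoc]
    · have hp : pvH z (c :: t)
          = (if pvNZ.contains c then [List.replicate z '0'] else []) ++ [c] :: pvH 0 t := by
        simp [pvH, hc]
      have h1 := pvSel_append t.reverse c false
      have h2 := pvKzA_append t.reverse c false
      rw [hp]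
      simp only [List.reverse_cons, h1, h2, if_neg hc]
      by_cases hnz : c ∈ pvNZ <;>
        simp [hnz, ih 0, List.append_assoc]

-- ===== VERDICT (by name: the statement is the Claim_ definition above) =====
theorem normalize_dni_spec : Claim_equal_normalize_dni := by
  intro dni _
  unfold Spec_normalize_dni normalize_dni normalize_dni_alt
  simp only
  rw [pvA_fold _ [] none, pvB_fold _ [] 0]
  simp only [List.nil_append]
  rw [pvH_sel]
  simp [pvKz]
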